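-- pv_equiv track=rewrite | github.com/santoshuppala/trading_hub | vwap_utils.py | detect_vwap_reclaim
-- ===== SOURCE A (Python) =====
-- def detect_vwap_reclaim(closes, vwaps, lookback=6, max_dip_age=4):
--     """
--     Flexible VWAP reclaim detector.
--
--     Pattern (oldest → newest):
--       1. Uptrend context  — at least 1 bar above VWAP before the dip
--       2. Dip              — at least 1 bar below VWAP (can span 1–N bars)
--       3. Recency check    — end of dip must be within max_dip_age bars of confirmation
--       4. 2-bar reclaim    — last 2 bars both above VWAP
--
--     Parameters
--     ----------
--     closes, vwaps  : list-like, oldest first, length >= 4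
--     lookback       : int  — how far back to search for the dip (default 6)
--     max_dip_age    : int  — max bars between end of dip and first confirm bar (default 4)
--                            Prevents stale dips from triggering when price has been
--                            below VWAP for a long time since the dip ended.
--
--     Returns
--     -------
--     bool
--     """
--     n = len(closes)
--     if n < 4:   # minimum: 2 confirm + 1 dip + 1 context
--         return False
--
--     # 2-bar confirmation: last 2 bars must be above VWAP
--     if closes[-1] <= vwaps[-1] or closes[-2] <= vwaps[-2]:
--         return False
--
--     # Search window: everything before the 2 confirmation bars
--     start = max(0, n - lookback - 2)
--     win_c = closes[start: n - 2]
--     win_v = vwaps[start: n - 2]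
--
--     # Walk backwards to find the rightmost bar below VWAP (end of dip)
--     dip_idx = None
--     for i in range(len(win_c) - 1, -1, -1):
--         if win_c[i] < win_v[i]:
--             dip_idx = i
--             break
--
--     if dip_idx is None:
--         return False  # no dip found in window
--
--     # Recency check: dip must end within max_dip_age bars of the first confirmation bar.
--     # len(win_c) - 1 - dip_idx = number of bars between dip end and win_c[-1],
--     # plus 1 more bar to reach the first confirmation bar (closes[-2]).
--     dip_age = (len(win_c) - 1 - dip_idx) + 1
--     if dip_age > max_dip_age:
--         return False  # dip is too old; trend context no longer intact
--
--     # Uptrend context: at least 1 bar above VWAP before the dip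
--     for i in range(dip_idx):
--         if win_c[i] > win_v[i]:
--             return True
--
--     return False
-- ===== SOURCE B (Python) =====
-- def detect_vwap_reclaim(closes, vwaps, lookback=6, max_dip_age=4):
--     n = len(closes)
--     if n < 4:
--         return False
--
--     # 2-bar confirmation: last 2 bars above VWAP
--     if closes[-1] <= vwaps[-1] or closes[-2] <= vwaps[-2]:
--         return False
--
--     start = max(0, n - lookback - 2)
--
--     # One forward pass over the window, no indices kept: a small state machine.
--     # above_seen : an above-VWAP bar has occurred so far
--     # dip_found  : a dip bar has occurred
--     # ctx_ok     : the most recent dip bar had an above bar before it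
--     # age        : bars elapsed since the most recent dip bar
--     above_seen = False
--     dip_found = False
--     ctx_ok = False
--     age = 0
--     for c, v in zip(closes[start:n - 2], vwaps[start:n - 2]):
--         if c < v:
--             dip_found = True
--             ctx_ok = above_seen
--             age = 0
--         else:
--             age += 1
--         if c > v:
--             above_seen = True
--
--     return dip_found and age + 1 <= max_dip_age and ctx_ok
-- ===== Notes on version B (the rewrite author's own statement) =====
-- stated objective: alternative
-- what changed: A's backward break-scan for the dip end plus a second forward index loop for the context bar are replaced by a single forward state-machine pass over the zipped window that keeps no indices at all, maintaining (above_seen, dip_found, ctx_ok, age) flags and deciding at the end from the final state.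
import Mathlib
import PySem

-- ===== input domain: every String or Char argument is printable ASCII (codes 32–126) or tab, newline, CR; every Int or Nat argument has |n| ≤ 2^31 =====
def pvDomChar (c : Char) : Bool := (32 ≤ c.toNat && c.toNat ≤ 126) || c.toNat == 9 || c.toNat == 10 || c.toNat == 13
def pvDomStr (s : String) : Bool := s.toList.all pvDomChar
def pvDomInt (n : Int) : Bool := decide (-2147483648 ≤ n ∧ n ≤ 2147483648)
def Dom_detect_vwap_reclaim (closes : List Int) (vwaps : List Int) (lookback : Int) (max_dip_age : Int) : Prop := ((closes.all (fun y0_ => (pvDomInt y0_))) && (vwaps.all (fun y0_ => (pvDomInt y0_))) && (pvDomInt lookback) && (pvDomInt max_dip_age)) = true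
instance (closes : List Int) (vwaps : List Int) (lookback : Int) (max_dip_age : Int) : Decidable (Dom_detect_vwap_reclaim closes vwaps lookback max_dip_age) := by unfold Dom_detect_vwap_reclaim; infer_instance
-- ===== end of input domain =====

-- B replaces A's backward dip scan and second forward context loop by ONE forward
-- state-machine pass over the zipped window (flags above_seen/dip_found/ctx_ok/age,
-- no indices kept); objective: alternative decomposition, same O(n) cost.

-- ===== PORT A =====
-- A's backward loop 'for i in range(len(win_c)-1, -1, -1): if win_c[i] < win_v[i]: dip_idx = i; break'
-- (getD is exact here: inside Pre_ every scanned index is in range for both windows)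
def pvDipDown (wc wv : List Int) : Nat → Option Int
  | 0 => none
  | i + 1 => if wc.getD i 0 < wv.getD i 0 then some (i : Int) else pvDipDown wc wv i

def detect_vwap_reclaim (closes : List Int) (vwaps : List Int) (lookback : Int) (max_dip_age : Int) : Bool :=
  let n : Int := closes.length
  if n < 4 then false
  else
    -- 'if closes[-1] <= vwaps[-1] or closes[-2] <= vwaps[-2]': Python raises where pyGet? is none (outside Pre_)
    match PySem.List.pyGet? closes (-1), PySem.List.pyGet? vwaps (-1) with
    | some c1, some v1 =>
      if c1 ≤ v1 then false
      else
        match PySem.List.pyGet? closes (-2), PySem.List.pyGet? vwaps (-2) with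
        | some c2, some v2 =>
          if c2 ≤ v2 then false
          else
            let start := max 0 (n - lookback - 2)
            let win_c := PySem.List.slice closes (some start) (some (n - 2))
            let win_v := PySem.List.slice vwaps (some start) (some (n - 2))
            match pvDipDown win_c win_v win_c.length with
            | none => false
            | some dip_idx =>
              let dip_age : Int := ((win_c.length : Int) - 1 - dip_idx) + 1
              if dip_age > max_dip_age then false
              else
                -- 'for i in range(dip_idx): if win_c[i] > win_v[i]: return True'
                (PySem.List.pyRange 0 dip_idx 1).any
                  (fun i => PySem.List.pyGetD win_v i 0 < PySem.List.pyGetD win_c i 0)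
        | _, _ => false
    | _, _ => false

-- ===== PORT B =====
-- the loop body of Source B: state = (above_seen, dip_found, ctx_ok, age)
def pvStep (s : Bool × Bool × Bool × Nat) (cv : Int × Int) : Bool × Bool × Bool × Nat :=
  let s' : Bool × Bool × Bool × Nat :=
    if cv.1 < cv.2 then (s.1, true, s.1, 0) else (s.1, s.2.1, s.2.2.1, s.2.2.2 + 1)
  (s'.1 || decide (cv.2 < cv.1), s'.2.1, s'.2.2.1, s'.2.2.2)

def detect_vwap_reclaim_alt (closes : List Int) (vwaps : List Int) (lookback : Int) (max_dip_age : Int) : Bool :=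
  let n : Int := closes.length
  if n < 4 then false
  else
    match PySem.List.pyGet? closes (-1) with
    | none => false
    | some c1 =>
      match PySem.List.pyGet? vwaps (-1) with
      | none => false
      | some v1 =>
        if c1 ≤ v1 then false
        else
          match PySem.List.pyGet? closes (-2) with
          | none => false
          | some c2 =>
            match PySem.List.pyGet? vwaps (-2) with
            | none => false
            | some v2 =>
              if c2 ≤ v2 then false
              else
                let start := max 0 (n - lookback - 2)
                let pairs := (PySem.List.slice closes (some start) (some (n - 2))).zip
                               (PySem.List.slice vwaps (some start) (some (n - 2)))
                let st := pairs.foldl pvStep (false, false, false, 0)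
                st.2.1 && decide ((st.2.2.2 : Int) + 1 ≤ max_dip_age) && st.2.2.1

-- ===== PRECONDITION & SPEC =====
-- Pre_ excludes exactly the inputs on which the Python A raises an IndexError
-- (vwaps empty or shorter than needed by the confirmation / window indexing); A returns on everything admitted.
def Pre_detect_vwap_reclaim (closes : List Int) (vwaps : List Int) (lookback : Int) (max_dip_age : Int) : Prop :=
  closes.length < 4 ∨
    (vwaps ≠ [] ∧
      (PySem.List.pyGetD closes (-1) 0 ≤ PySem.List.pyGetD vwaps (-1) 0 ∨
        (2 ≤ vwaps.length ∧
          (PySem.List.pyGetD closes (-2) 0 ≤ PySem.List.pyGetD vwaps (-2) 0 ∨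
            lookback < 1 ∨
            (closes.length : Int) - 2 ≤ (vwaps.length : Int)))))

instance (closes : List Int) (vwaps : List Int) (lookback : Int) (max_dip_age : Int) : Decidable (Pre_detect_vwap_reclaim closes vwaps lookback max_dip_age) := by
  unfold Pre_detect_vwap_reclaim; infer_instance

def pvWitness_detect_vwap_reclaim : List Int × List Int × Int × Int := ([0, -1, 2, 3], [1, 0, 1, 1], 6, 4)

def Spec_detect_vwap_reclaim (closes : List Int) (vwaps : List Int) (lookback : Int) (max_dip_age : Int) (out : Bool) : Prop := out = detect_vwap_reclaim_alt closes vwaps lookback max_dip_age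
instance (closes : List Int) (vwaps : List Int) (lookback : Int) (max_dip_age : Int) (out : Bool) : Decidable (Spec_detect_vwap_reclaim closes vwaps lookback max_dip_age out) := by unfold Spec_detect_vwap_reclaim; infer_instance

-- ===== CLAIM (what is proved, stated in full; the proofs are below) =====
def Claim_equal_detect_vwap_reclaim : Prop := ∀ (closes : List Int) (vwaps : List Int) (lookback : Int) (max_dip_age : Int), Dom_detect_vwap_reclaim closes vwaps lookback max_dip_age → Pre_detect_vwap_reclaim closes vwaps lookback max_dip_age → Spec_detect_vwap_reclaim closes vwaps lookback max_dip_age (detect_vwap_reclaim closes vwaps lookback max_dip_age)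

-- ===== LEMMAS AND PROOFS =====

-- pyGetD agrees with a successful pyGet?
theorem pvGetD_of_get? {xs : List Int} {i x : Int} (h : PySem.List.pyGet? xs i = some x) :
    PySem.List.pyGetD xs i 0 = x := by
  simp [PySem.List.pyGetD, h]

-- pvDipDown only returns in-range indices
theorem pvDipDown_some {wc wv : List Int} {k : Nat} {d : Int}
    (h : pvDipDown wc wv k = some d) : 0 ≤ d ∧ d.toNat < k := by
  induction k with
  | zero => simp [pvDipDown] at h
  | succ i ih =>
    unfold pvDipDown at h
    split at h
    · cases h; constructor <;> simp
    · have := ih h; omega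

-- the fold state after the first k pairs, characterised through A's backward scan
theorem fold_inv (wc wv : List Int) (hEq : wc.length = wv.length) (k : Nat) (hk : k ≤ wc.length) :
    (((wc.zip wv).take k).foldl pvStep (false, false, false, 0)).1
        = ((wc.zip wv).take k).any (fun p => decide (p.2 < p.1)) ∧
    (match pvDipDown wc wv k with
     | none => (((wc.zip wv).take k).foldl pvStep (false, false, false, 0)).2.1 = false
     | some d =>
       (((wc.zip wv).take k).foldl pvStep (false, false, false, 0)).2.1 = true ∧
       (((wc.zip wv).take k).foldl pvStep (false, false, false, 0)).2.2.1
           = ((wc.zip wv).take d.toNat).any (fun p => decide (p.2 < p.1)) ∧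
       (((wc.zip wv).take k).foldl pvStep (false, false, false, 0)).2.2.2 = k - 1 - d.toNat) := by
  induction k with
  | zero => simp [pvDipDown]
  | succ i ih =>
    have hi : i < wc.length := by omega
    have hi' : i < wv.length := by omega
    have hiz : i < (wc.zip wv).length := by simp; omega
    have htake : (wc.zip wv).take (i+1) = (wc.zip wv).take i ++ [(wc.zip wv)[i]] := by
      rw [List.take_add_one]; simp [List.getElem?_eq_getElem hiz]
    have hgz : (wc.zip wv)[i] = (wc[i], wv[i]) := by simp
    obtain ⟨ih1, ih2⟩ := ih (by omega)
    rw [htake, List.foldl_append]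
    unfold pvDipDown
    rw [List.getD_eq_getElem wc 0 hi, List.getD_eq_getElem wv 0 hi']
    by_cases hdip : wc[i] < wv[i]
    · have hnab : ¬ wv[i] < wc[i] := by omega
      simp only [hdip, if_pos, List.foldl_cons, List.foldl_nil, hgz]
      constructor
      · simp [pvStep, hdip, hnab, List.any_append, ih1]
      · refine ⟨?_, ?_, ?_⟩
        · simp [pvStep, hdip]
        · simp only [pvStep, hdip, if_pos]
          simpa using ih1
        · simp [pvStep, hdip]
    · simp only [hdip, if_false, List.foldl_cons, List.foldl_nil, hgz]
      have h1 : ((wc.zip wv).take i ++ [(wc[i], wv[i])]).any (fun p => decide (p.2 < p.1))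
          = (((wc.zip wv).take i).any (fun p => decide (p.2 < p.1)) || decide (wv[i] < wc[i])) := by
        simp [List.any_append]
      constructor
      · simp [pvStep, hdip, h1, ih1]
      · cases hdd : pvDipDown wc wv i with
        | none =>
          rw [hdd] at ih2
          simp [pvStep, hdip, ih2]
        | some d =>
          rw [hdd] at ih2
          obtain ⟨hdf, hctx, hage⟩ := ih2
          obtain ⟨hd0, hdk⟩ := pvDipDown_some hdd
          refine ⟨?_, ?_, ?_⟩
          · simp [pvStep, hdip, hdf]
          · simp [pvStep, hdip, hctx]
          · simp only [pvStep, hdip, if_false]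
            simp [hage]; omega

-- A's forward context scan agrees with an any() over the prefix of the zipped window
theorem context_any_eq (wc wv : List Int) (d : Int)
    (hEq : wc.length = wv.length) (hd0 : 0 ≤ d) (hd : d.toNat ≤ wc.length) :
    (PySem.List.pyRange 0 d 1).any
        (fun i => PySem.List.pyGetD wv i 0 < PySem.List.pyGetD wc i 0)
      = ((wc.zip wv).take d.toNat).any (fun p => decide (p.2 < p.1)) := by
  have hzlen : (wc.zip wv).length = wc.length := by simp; omega
  rw [Bool.eq_iff_iff]
  simp only [List.any_eq_true, decide_eq_true_eq]
  constructor
  · rintro ⟨i, hi, hlt⟩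
    have hmem := (PySem.List.mem_pyRange_one).mp hi
    have h0i : 0 ≤ i := hmem.1
    have hid : i < d := hmem.2
    have hiN : i.toNat < d.toNat := by omega
    refine ⟨((wc.zip wv).take d.toNat)[i.toNat]'(by simp; omega), List.getElem_mem _, ?_⟩
    rw [List.getElem_take]
    have hz : (wc.zip wv)[i.toNat]'(by omega) = (wc[i.toNat]'(by omega), wv[i.toNat]'(by omega)) := by
      simp
    rw [hz]
    rw [PySem.List.pyGetD_eq_getElem wc 0 h0i (by omega),
        PySem.List.pyGetD_eq_getElem wv 0 h0i (by omega)] at hlt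
    exact hlt
  · rintro ⟨cv, hcv, hlt⟩
    obtain ⟨j, hj, rfl⟩ := List.mem_iff_getElem.mp hcv
    have htlen : ((wc.zip wv).take d.toNat).length = d.toNat := by simp; omega
    have hjd : j < d.toNat := by omega
    refine ⟨(j : Int), ?_, ?_⟩
    · rw [PySem.List.mem_pyRange_one]; constructor <;> omega
    · rw [PySem.List.pyGetD_eq_getElem wc 0 (by omega) (by simp; omega),
          PySem.List.pyGetD_eq_getElem wv 0 (by omega) (by simp; omega)]
      have hz : ((wc.zip wv).take d.toNat)[j] = (wc[(j:Int).toNat]'(by simp; omega), wv[(j:Int).toNat]'(by simp; omega)) := by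
        rw [List.getElem_take]; simp
      rw [hz] at hlt
      exact hlt

-- the whole tail (after the window is built) agrees on equal-length windows
theorem tail_eq (wc wv : List Int) (ma : Int) (hEq : wc.length = wv.length) :
    (match pvDipDown wc wv wc.length with
     | none => false
     | some dip_idx =>
       if ((wc.length : Int) - 1 - dip_idx) + 1 > ma then false
       else (PySem.List.pyRange 0 dip_idx 1).any
              (fun i => PySem.List.pyGetD wv i 0 < PySem.List.pyGetD wc i 0))
    = (((wc.zip wv).foldl pvStep (false, false, false, 0)).2.1 &&
         decide ((((wc.zip wv).foldl pvStep (false, false, false, 0)).2.2.2 : Int) + 1 ≤ ma) &&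
         ((wc.zip wv).foldl pvStep (false, false, false, 0)).2.2.1) := by
  have hzlen : (wc.zip wv).length = wc.length := by simp; omega
  have hfull : (wc.zip wv).take wc.length = (wc.zip wv) := by
    rw [← hzlen]; exact List.take_length
  have hinv := fold_inv wc wv hEq wc.length le_rfl
  rw [hfull] at hinv
  obtain ⟨_, hinv2⟩ := hinv
  cases h : pvDipDown wc wv wc.length with
  | none =>
    rw [h] at hinv2
    simp [hinv2]
  | some d =>
    rw [h] at hinv2
    obtain ⟨hdf, hctx, hage⟩ := hinv2
    obtain ⟨hd0, hdk⟩ := pvDipDown_some h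
    rw [hdf, hctx, hage]
    by_cases hif : ((wc.length : Int) - 1 - d) + 1 > ma
    · have : ¬ ((((wc.length - 1 - d.toNat : Nat)) : Int) + 1 ≤ ma) := by omega
      simp [hif, this]
    · have : ((((wc.length - 1 - d.toNat : Nat)) : Int) + 1 ≤ ma) := by omega
      simp only [hif, if_false, this, decide_true, Bool.true_and, Bool.and_true]
      exact context_any_eq wc wv d hEq hd0 (by omega)

-- the two windows have equal length on every admitted input
theorem win_len_eq (closes vwaps : List Int) (a b : Int) (h0a : 0 ≤ a) (h0b : 0 ≤ b)
    (h : b.toNat ≤ a.toNat ∨ (b.toNat ≤ closes.length ∧ b.toNat ≤ vwaps.length)) :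
    (PySem.List.slice closes (some a) (some b)).length
      = (PySem.List.slice vwaps (some a) (some b)).length := by
  rw [PySem.List.slice_toNat _ h0a h0b, PySem.List.slice_toNat _ h0a h0b]
  simp only [List.length_take, List.length_drop]
  omega

-- ===== VERDICT (by name: the statement is the Claim_ definition above) =====
theorem detect_vwap_reclaim_spec : Claim_equal_detect_vwap_reclaim := by
  intro closes vwaps lookback max_dip_age _ hpre
  unfold Spec_detect_vwap_reclaim detect_vwap_reclaim detect_vwap_reclaim_alt
  by_cases hn : (closes.length : Int) < 4
  · simp [hn]
  · simp only [if_neg hn]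
    rcases h1 : PySem.List.pyGet? closes (-1) with _ | c1 <;>
      rcases h2 : PySem.List.pyGet? vwaps (-1) with _ | v1 <;> try rfl
    by_cases hc1 : c1 ≤ v1
    · simp [hc1]
    · simp only [if_neg hc1]
      rcases h3 : PySem.List.pyGet? closes (-2) with _ | c2 <;>
        rcases h4 : PySem.List.pyGet? vwaps (-2) with _ | v2 <;> try rfl
      by_cases hc2 : c2 ≤ v2
      · simp [hc2]
      · simp only [if_neg hc2]
        have hvz : vwaps ≠ [] := by
          intro hnil; rw [hnil] at h2; simp [PySem.List.pyGet?] at h2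
        have hv2 : 2 ≤ vwaps.length := by
          by_contra hlt
          have : PySem.List.pyGet? vwaps (-2) = none := by
            rw [PySem.List.pyGet?_eq_none_iff, PySem.Raise.InRange]
            push Not
            omega
          rw [this] at h4; cases h4
        have hdisj : lookback < 1 ∨ (closes.length : Int) - 2 ≤ (vwaps.length : Int) := by
          rcases hpre with h | ⟨_, h | ⟨_, h | h | h⟩⟩
          · omega
          · rw [pvGetD_of_get? h1, pvGetD_of_get? h2] at h; omega
          · rw [pvGetD_of_get? h3, pvGetD_of_get? h4] at h; omega
          · exact Or.inl h
          · exact Or.inr h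
        have hlen : (PySem.List.slice closes (some (max 0 ((closes.length : Int) - lookback - 2))) (some ((closes.length : Int) - 2))).length
            = (PySem.List.slice vwaps (some (max 0 ((closes.length : Int) - lookback - 2))) (some ((closes.length : Int) - 2))).length := by
          apply win_len_eq _ _ _ _ (le_max_left _ _) (by omega)
          rcases hdisj with h | h
          · left
            have : (closes.length : Int) - 2 ≤ max 0 ((closes.length : Int) - lookback - 2) := by
              have := le_max_right (0:Int) ((closes.length : Int) - lookback - 2); omega
            omega
          · right; constructor <;> omega
        exact tail_eq _ _ max_dip_age hlen
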